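-- pv_equiv track=rewrite | github.com/abdalgader-a/algorithms | interview_problems/contiguous_subarrays.py | count_subarrays2
-- ===== SOURCE A (Python) =====
-- def count_subarrays2(arr) -> list:
--     # Write your code here
--     sub_count = dict(zip(arr, [1] * len(arr)))
--     for k, n in enumerate(arr):
--         for z in range(k - 1, -1, -1):
--             if arr[k] > arr[z]:
--                 sub_count[n] += 1
--             else:
--                 break
--
--         for z in range(k + 1, len(arr)):
--             if arr[k] > arr[z]:
--                 sub_count[n] += 1
--             else:
--                 break
--     return list(sub_count.values())
-- ===== SOURCE B (Python) =====
-- def count_subarrays2(arr) -> list: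
--     # O(n) monotonic-stack re-implementation: per-index spans via stack, aggregated
--     # into a value-keyed dict in first-occurrence order (same as A's dict).
--     def spans(xs):
--         st = []   # stack of (value, span), span = 1 + spans of popped smaller values
--         out = []
--         for v in xs:
--             c = 1
--             while st and st[-1][0] < v:
--                 c += st.pop()[1]
--             st.append((v, c))
--             out.append(c)
--         return out
--     left = spans(arr)
--     right = spans(arr[::-1])[::-1]
--     d = {}
--     for v, l, r in zip(arr, left, right):
--         d[v] = d.get(v, 1) + (l - 1) + (r - 1)
--     return list(d.values())
-- ===== Notes on version B (the rewrite author's own statement) =====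
-- stated objective: faster
-- what changed: Replaces A's O(n^2) per-index left/right neighbour scans (with break) by two O(n) monotonic-stack span passes (one over the array, one over its reversal), then aggregates the per-index counts into the same value-keyed dict in first-occurrence order with get-with-default instead of A's pre-seeded dict of ones.
import Mathlib
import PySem

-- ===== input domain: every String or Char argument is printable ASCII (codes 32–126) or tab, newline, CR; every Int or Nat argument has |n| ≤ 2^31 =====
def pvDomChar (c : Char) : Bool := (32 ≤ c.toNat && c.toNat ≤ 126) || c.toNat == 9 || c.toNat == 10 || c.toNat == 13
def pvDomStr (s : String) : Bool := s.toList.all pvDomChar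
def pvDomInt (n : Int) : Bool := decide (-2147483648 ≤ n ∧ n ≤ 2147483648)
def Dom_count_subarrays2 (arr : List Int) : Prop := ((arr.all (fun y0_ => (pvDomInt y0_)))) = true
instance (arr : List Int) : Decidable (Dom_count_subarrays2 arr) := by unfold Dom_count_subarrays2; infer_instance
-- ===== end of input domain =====

-- B replaces A's quadratic per-index neighbour scans by two monotonic-stack passes
-- (O(n)), aggregating into the same value-keyed dict in first-occurrence order.


-- ===== PORT A =====
-- inner 'for z in range(…): if arr[k] > arr[z]: sub_count[n] += 1 else: break'
-- (sub_count[n] += 1 with n always a key is Dict.modify n 0 (· + 1);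
--  the 'none' branch of pyGet? is unreachable: all generated indices are in range)
def aScan (arr : List Int) (n : Int) : List Int → PySem.Dict Int Int → PySem.Dict Int Int
  | [], d => d
  | z :: zs, d =>
    match PySem.List.pyGet? arr z with
    | some x => if n > x then aScan arr n zs (d.modify n 0 (· + 1)) else d
    | none => d

-- body of 'for k, n in enumerate(arr)': the two index scans
def aStep (arr : List Int) (d : PySem.Dict Int Int) (kn : Int × Int) : PySem.Dict Int Int :=
  let d1 := aScan arr kn.2 (PySem.List.pyRange (kn.1 - 1) (-1) (-1)) d
  aScan arr kn.2 (PySem.List.pyRange (kn.1 + 1) (arr.length : Int) 1) d1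

def count_subarrays2 (arr : List Int) : List Int :=
  let sub0 := PySem.Dict.ofList (arr.zip (PySem.List.pyRepeat [(1 : Int)] (arr.length : Int)))
  let d := (PySem.List.enumerate arr).foldl (aStep arr) sub0
  d.values

-- ===== PORT B =====
-- 'while st and st[-1][0] < v: c += st.pop()[1]'
def popAcc (v : Int) : Int → List (Int × Int) → Int × List (Int × Int)
  | c, [] => (c, [])
  | c, (u, s) :: st => if u < v then popAcc v (c + s) st else (c, (u, s) :: st)

-- the 'for v in xs' loop of spans: stack st, output accumulated (reversed)
def spansGo : List Int → List (Int × Int) → List Int → List Int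
  | [], _, out => out.reverse
  | v :: xs, st, out =>
    let p := popAcc v 1 st
    spansGo xs ((v, p.1) :: p.2) (p.1 :: out)

def spans (xs : List Int) : List Int := spansGo xs [] []

def count_subarrays2_alt (arr : List Int) : List Int :=
  let left := spans arr
  let right := (spans arr.reverse).reverse
  let d := (arr.zip (left.zip right)).foldl
    (fun d vlr => d.insert vlr.1 (d.getD vlr.1 1 + (vlr.2.1 - 1) + (vlr.2.2 - 1)))
    PySem.Dict.empty
  d.values

-- ===== PRECONDITION & SPEC =====
def Spec_count_subarrays2 (arr : List Int) (out : List Int) : Prop := out = count_subarrays2_alt arr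
instance (arr : List Int) (out : List Int) : Decidable (Spec_count_subarrays2 arr out) := by unfold Spec_count_subarrays2; infer_instance

-- ===== CLAIM (what is proved, stated in full; the proofs are below) =====
def Claim_equal_count_subarrays2 : Prop := ∀ (arr : List Int), Dom_count_subarrays2 arr → Spec_count_subarrays2 arr (count_subarrays2 arr)

-- ===== LEMMAS AND PROOFS =====

-- length of the strictly-smaller prefix of l, as an Int
def tw (v : Int) (l : List Int) : Int := ((l.takeWhile (fun x => decide (x < v))).length : Int)

-- target per-index pairs (value, left-count + right-count); pre = reversed prefix
def cnt (pre : List Int) : List Int → List (Int × Int)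
  | [] => []
  | v :: suf => (v, tw v pre + tw v suf) :: cnt (v :: pre) suf

-- B's left spans, specified: specSpans pre suf lists 1 + tw v pre as pre grows
def specSpans (pre : List Int) : List Int → List Int
  | [] => []
  | v :: suf => (1 + tw v pre) :: specSpans (v :: pre) suf

-- B's right spans, specified
def rsp : List Int → List Int
  | [] => []
  | v :: suf => (1 + tw v suf) :: rsp suf

-- first occurrences of l not in seen, in order
def remF0 : List Int → List Int → List Int
  | [], _ => []
  | v :: l, seen => if v ∈ seen then remF0 l seen else v :: remF0 l (v :: seen)

-- stack invariant: the stack entries decompose the reversed processed prefix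
inductive StInv : List (Int × Int) → List Int → Prop
  | nil : StInv [] []
  | cons (v : Int) (tail : List Int) (st : List (Int × Int)) (rest : List Int)
      (htail : ∀ x ∈ tail, x < v) (hrec : StInv st rest) :
      StInv ((v, 1 + (tail.length : Int)) :: st) (v :: (tail ++ rest))

theorem pop_spec {st : List (Int × Int)} {l : List Int} (h : StInv st l) (v : Int) :
    ∀ c, (popAcc v c st).1 = c + tw v l ∧
      StInv (popAcc v c st).2 (l.dropWhile (fun x => decide (x < v))) := by
  induction h with
  | nil => intro c; exact ⟨by simp [popAcc, tw], by simpa [popAcc] using StInv.nil⟩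
  | cons w tail st rest htail hrec ih =>
    intro c
    by_cases hw : w < v
    · have htake : tail.takeWhile (fun x => decide (x < v)) = tail := by
        rw [List.takeWhile_eq_self_iff]
        intro x hx; simpa using lt_trans (htail x hx) hw
      have hdrop : tail.dropWhile (fun x => decide (x < v)) = [] := by
        rw [List.dropWhile_eq_nil_iff]
        intro x hx; simpa using lt_trans (htail x hx) hw
      have h1 : popAcc v c ((w, 1 + (tail.length : Int)) :: st)
          = popAcc v (c + (1 + (tail.length : Int))) st := by
        simp [popAcc, hw]
      have h2 := ih (c + (1 + (tail.length : Int)))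
      constructor
      · rw [h1, h2.1, tw, tw]
        rw [List.takeWhile_cons_of_pos (by simpa using hw), List.takeWhile_append, htake]
        simp; ring
      · rw [h1]
        rw [List.dropWhile_cons_of_pos (by simpa using hw), List.dropWhile_append, hdrop]
        simpa using h2.2
    · have h1 : popAcc v c ((w, 1 + (tail.length : Int)) :: st)
          = (c, (w, 1 + (tail.length : Int)) :: st) := by
        simp [popAcc, hw]
      constructor
      · rw [h1, tw, List.takeWhile_cons_of_neg (by simpa using hw)]
        simp
      · rw [h1, List.dropWhile_cons_of_neg (by simpa using hw)]
        exact StInv.cons w tail st rest htail hrec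

theorem spansGo_spec : ∀ (xs : List Int) (st : List (Int × Int)) (out l : List Int),
    StInv st l → spansGo xs st out = out.reverse ++ specSpans l xs := by
  intro xs
  induction xs with
  | nil => intro st out l h; simp [spansGo, specSpans]
  | cons v xs ih =>
    intro st out l h
    have hp := pop_spec h v 1
    have hpush : StInv ((v, (popAcc v 1 st).1) :: (popAcc v 1 st).2) (v :: l) := by
      have hl : v :: l = v :: (l.takeWhile (fun x => decide (x < v))
          ++ l.dropWhile (fun x => decide (x < v))) := by
        rw [List.takeWhile_append_dropWhile]
      rw [hl, hp.1]
      have : (1 : Int) + tw v l = 1 + (((l.takeWhile (fun x => decide (x < v))).length : Int)) := by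
        rw [tw]
      rw [this]
      exact StInv.cons v _ _ _ (fun x hx => by simpa using List.mem_takeWhile_imp hx) hp.2
    rw [spansGo, ih _ _ _ hpush]
    rw [specSpans, hp.1]
    simp [List.append_assoc]

theorem specSpans_append_singleton : ∀ (ys : List Int) (l : List Int) (v : Int),
    specSpans l (ys ++ [v]) = specSpans l ys ++ [1 + tw v (ys.reverse ++ l)] := by
  intro ys
  induction ys with
  | nil => intro l v; simp [specSpans]
  | cons a ys ih =>
    intro l v
    rw [List.cons_append, specSpans, specSpans, ih (a :: l) v]
    simp

theorem rsp_eq : ∀ xs : List Int, (specSpans [] xs.reverse).reverse = rsp xs := by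
  intro xs
  induction xs with
  | nil => simp [specSpans, rsp]
  | cons v suf ih =>
    rw [List.reverse_cons, specSpans_append_singleton, rsp]
    simp [ih]

-- ---- dict items-level lemmas ----

-- replacing the (unique) entry at an existing key by its own value is the identity
-- mapping an if-key-matches update over a list without that key is the identity
theorem map_if_id (l : List (Int × Int)) (v : Int) (g : Int × Int → Int × Int)
    (h : ∀ q ∈ l, q.1 ≠ v) : l.map (fun p => if p.1 == v then g p else p) = l := by
  conv_rhs => rw [← List.map_id l]
  apply List.map_congr_left
  intro q hq
  simp [h q hq]

theorem map_if_eq_self : ∀ (l : List (Int × Int)) (n w : Int),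
    (l.map Prod.fst).Nodup → (∀ q ∈ l, q.1 = n → q.2 = w) →
    l.map (fun p => if p.1 == n then (n, w) else p) = l := by
  intro l
  induction l with
  | nil => intro n w _ _; rfl
  | cons p l ih =>
    intro n w hnd hval
    have hnd' : (p.1 :: l.map Prod.fst).Nodup := by simpa using hnd
    obtain ⟨hp, hl⟩ := List.nodup_cons.mp hnd'
    by_cases hpn : p.1 = n
    · have h2 : p.2 = w := hval p (by simp) hpn
      have htail : l.map (fun p => if p.1 == n then (n, w) else p) = l := by
        conv_rhs => rw [← List.map_id l]
        apply List.map_congr_left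
        intro q hq
        have hq1 : q.1 ≠ n := by
          intro h
          exact hp (List.mem_map.mpr ⟨q, hq, h.trans hpn.symm⟩)
        simp [hq1]
      have hpeq : (n, w) = p := by rw [← hpn, ← h2]
      rw [List.map_cons, if_pos (by simp [hpn]), htail, hpeq]
    · have htail := ih n w hl (fun q hq h => hval q (by simp [hq]) h)
      rw [List.map_cons, if_neg (by simp [hpn]), htail]

theorem insert_getD_self (d : PySem.Dict Int Int) (n : Int)
    (hnd : d.keys.Nodup) (hc : d.contains n = true) :
    d.insert n (d.getD n 0) = d := by
  apply PySem.Dict.ext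
  simp only [PySem.Dict.insert, hc, if_pos]
  apply map_if_eq_self
  · simpa [PySem.Dict.keys] using hnd
  · intro q hq hqn
    have := PySem.Dict.getD_of_mem_items (d := d) (k := n) (v := q.2) (d0 := (0:Int))
      (by rw [← hqn]; exact hq) hnd
    omega

theorem modify_modify (d : PySem.Dict Int Int) (n a b : Int) :
    (d.modify n 0 (· + a)).modify n 0 (· + b) = d.modify n 0 (· + (a + b)) := by
  simp [PySem.Dict.modify, PySem.Dict.getD_insert_self, PySem.Dict.insert_insert_self, add_assoc]

theorem modify_append_left (l₁ l₂ : List (Int × Int)) (v c : Int)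
    (h₁ : v ∈ l₁.map Prod.fst) (h₂ : v ∉ l₂.map Prod.fst) :
    (PySem.Dict.mk (l₁ ++ l₂) : PySem.Dict Int Int).modify v 0 (· + c)
      = PySem.Dict.mk (((PySem.Dict.mk l₁ : PySem.Dict Int Int).modify v 0 (· + c)).items ++ l₂) := by
  rcases List.mem_map.mp h₁ with ⟨q, hq, hqv⟩
  have hc1 : (PySem.Dict.mk l₁ : PySem.Dict Int Int).contains v = true := by
    simp only [PySem.Dict.contains, List.any_eq_true]
    exact ⟨q, hq, by simp [hqv]⟩
  have hc : (PySem.Dict.mk (l₁ ++ l₂) : PySem.Dict Int Int).contains v = true := by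
    simp only [PySem.Dict.contains, List.any_eq_true] at hc1 ⊢
    rcases hc1 with ⟨q, hq, hb⟩; exact ⟨q, List.mem_append_left _ hq, hb⟩
  have hfind : l₁.find? (fun p => p.1 == v) ≠ none := by
    intro h
    have := List.find?_eq_none.mp h q hq
    simp [hqv] at this
  have hget : (PySem.Dict.mk (l₁ ++ l₂) : PySem.Dict Int Int).getD v 0
      = (PySem.Dict.mk l₁ : PySem.Dict Int Int).getD v 0 := by
    simp only [PySem.Dict.getD, PySem.Dict.get?, List.find?_append]
    rcases Option.ne_none_iff_exists'.mp hfind with ⟨r, hr⟩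
    simp [hr]
  have hmap2 : l₂.map (fun p => if p.1 == v then (v, (PySem.Dict.mk l₁ : PySem.Dict Int Int).getD v 0 + c) else p) = l₂ :=
    map_if_id l₂ v _ (fun q2 hq2 h => h₂ (List.mem_map.mpr ⟨q2, hq2, h⟩))
  simp only [PySem.Dict.modify, PySem.Dict.insert, hc, hc1, if_pos, hget, List.map_append, hmap2]

theorem modify_mid (l₁ l₂ : List (Int × Int)) (v c : Int)
    (h₁ : v ∉ l₁.map Prod.fst) (h₂ : v ∉ l₂.map Prod.fst) :
    (PySem.Dict.mk (l₁ ++ (v, 1) :: l₂) : PySem.Dict Int Int).modify v 0 (· + c)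
      = PySem.Dict.mk (l₁ ++ (v, 1 + c) :: l₂) := by
  have hne1 : ∀ q ∈ l₁, (q : Int × Int).1 ≠ v := fun q hq h => h₁ (List.mem_map.mpr ⟨q, hq, h⟩)
  have hne2 : ∀ q ∈ l₂, (q : Int × Int).1 ≠ v := fun q hq h => h₂ (List.mem_map.mpr ⟨q, hq, h⟩)
  have hc : (PySem.Dict.mk (l₁ ++ (v, 1) :: l₂) : PySem.Dict Int Int).contains v = true := by
    simp only [PySem.Dict.contains, List.any_eq_true]
    exact ⟨(v, 1), by simp, by simp⟩
  have hfind1 : l₁.find? (fun p => p.1 == v) = none :=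
    List.find?_eq_none.mpr (fun q hq => by simp [hne1 q hq])
  have hget : (PySem.Dict.mk (l₁ ++ (v, 1) :: l₂) : PySem.Dict Int Int).getD v 0 = 1 := by
    simp [PySem.Dict.getD, PySem.Dict.get?, List.find?_append, hfind1]
  have hmap1 : l₁.map (fun p => if p.1 == v then (v, (1 : Int) + c) else p) = l₁ :=
    map_if_id l₁ v _ hne1
  have hmap2 : l₂.map (fun p => if p.1 == v then (v, (1 : Int) + c) else p) = l₂ :=
    map_if_id l₂ v _ hne2
  simp only [PySem.Dict.modify, PySem.Dict.insert, hc, if_pos, hget, List.map_append, List.map_cons]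
  rw [hmap1, hmap2]
  simp

theorem insert_present (E : PySem.Dict Int Int) (v c : Int) (hc : E.contains v = true) :
    E.insert v (E.getD v 1 + c) = E.modify v 0 (· + c) := by
  have hs : (E.get? v).isSome := by rw [← PySem.Dict.contains_eq_isSome_get?, hc]
  rcases Option.isSome_iff_exists.mp hs with ⟨w, hw⟩
  simp [PySem.Dict.modify, PySem.Dict.getD, hw]

theorem insert_absent (E : PySem.Dict Int Int) (v c : Int) (hc : E.contains v = false) :
    E.insert v (E.getD v 1 + c) = PySem.Dict.mk (E.items ++ [(v, 1 + c)]) := by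
  have hn : E.get? v = none := by
    rcases h : E.get? v with _ | w
    · rfl
    · rw [PySem.Dict.contains_eq_isSome_get?, h] at hc; simp at hc
  simp [PySem.Dict.insert, hc, PySem.Dict.getD, hn]

-- ---- remF0 facts ----

theorem mem_remF0_iff : ∀ (l seen : List Int) (x : Int), x ∈ remF0 l seen ↔ x ∈ l ∧ x ∉ seen := by
  intro l
  induction l with
  | nil => intro seen x; simp [remF0]
  | cons v l ih =>
    intro seen x
    by_cases hv : v ∈ seen
    · rw [remF0, if_pos hv, ih]
      constructor
      · rintro ⟨h1, h2⟩; exact ⟨by simp [h1], h2⟩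
      · rintro ⟨h1, h2⟩
        rcases List.mem_cons.mp h1 with h | h
        · exact absurd (h ▸ hv) h2
        · exact ⟨h, h2⟩
    · rw [remF0, if_neg hv]
      by_cases hxv : x = v
      · subst hxv; simp [hv]
      · rw [List.mem_cons]
        simp only [hxv, false_or]
        rw [ih]
        constructor
        · rintro ⟨h1, h2⟩; exact ⟨by simp [h1], fun h => h2 (by simp [h, hxv])⟩
        · rintro ⟨h1, h2⟩
          rcases List.mem_cons.mp h1 with h | h
          · exact absurd h hxv
          · exact ⟨h, fun hm => (List.mem_cons.mp hm).elim (fun he => absurd he hxv) h2⟩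

theorem remF0_congr : ∀ (l s t : List Int), (∀ x, x ∈ s ↔ x ∈ t) → remF0 l s = remF0 l t := by
  intro l
  induction l with
  | nil => intro s t h; rfl
  | cons v l ih =>
    intro s t h
    by_cases hv : v ∈ s
    · rw [remF0, if_pos hv, remF0, if_pos ((h v).mp hv)]
      exact ih s t h
    · rw [remF0, if_neg hv, remF0, if_neg (fun hm => hv ((h v).mpr hm))]
      rw [ih (v :: s) (v :: t) (fun x => by simp [h x])]

theorem nodup_remF0 : ∀ (l seen : List Int), (remF0 l seen).Nodup := by
  intro l
  induction l with
  | nil => intro seen; simp [remF0]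
  | cons v l ih =>
    intro seen
    by_cases hv : v ∈ seen
    · rw [remF0, if_pos hv]; exact ih seen
    · rw [remF0, if_neg hv]
      refine List.nodup_cons.mpr ⟨fun hm => ?_, ih (v :: seen)⟩
      exact ((mem_remF0_iff l (v :: seen) v).mp hm).2 (by simp)

-- ---- seed dict ----

theorem seed_eq : ∀ (l : List Int) (E : PySem.Dict Int Int),
    (∀ p ∈ E.items, p.2 = (1 : Int)) → E.keys.Nodup →
    (l.map (fun v => (v, (1 : Int)))).foldl (fun d p => d.insert p.1 p.2) E
      = PySem.Dict.mk (E.items ++ (remF0 l E.keys).map (fun v => (v, 1))) := by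
  intro l
  induction l with
  | nil =>
    intro E _ _
    cases E with
    | mk items => simp [remF0]
  | cons v l ih =>
    intro E hval hnd
    rw [List.map_cons, List.foldl_cons]
    by_cases hc : E.contains v = true
    · have hmem : v ∈ E.keys := (PySem.Dict.contains_iff_mem_keys E v).mp hc
      have hins : E.insert v 1 = E := by
        apply PySem.Dict.ext
        simp only [PySem.Dict.insert, hc, if_pos]
        exact map_if_eq_self E.items v 1 (by simpa [PySem.Dict.keys] using hnd)
          (fun q hq _ => hval q hq)
      rw [show (E.insert v 1 : PySem.Dict Int Int) = E from hins, ih E hval hnd,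
        remF0, if_pos hmem]
    · have hmem : v ∉ E.keys := fun hm =>
        absurd ((PySem.Dict.contains_iff_mem_keys E v).mpr hm) (by simp [hc])
      have hcb : E.contains v = false := by simpa using hc
      have hins : E.insert v 1 = PySem.Dict.mk (E.items ++ [(v, 1)]) := by
        simp [PySem.Dict.insert, hcb]
      have hkeys : (PySem.Dict.mk (E.items ++ [(v, 1)]) : PySem.Dict Int Int).keys
          = E.keys ++ [v] := by
        simp [PySem.Dict.keys]
      have hnd' : (PySem.Dict.mk (E.items ++ [(v, 1)]) : PySem.Dict Int Int).keys.Nodup := by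
        rw [hkeys]
        exact List.Nodup.append hnd (List.nodup_singleton v)
          (fun a ha hb => hmem ((List.mem_singleton.mp hb) ▸ ha))
      have hval' : ∀ p ∈ (PySem.Dict.mk (E.items ++ [(v, 1)]) : PySem.Dict Int Int).items,
          p.2 = (1 : Int) := by
        intro p hp
        rcases List.mem_append.mp hp with h | h
        · exact hval p h
        · simp at h; simp [h]
      rw [hins, ih _ hval' hnd', hkeys,
        remF0_congr l (E.keys ++ [v]) (v :: E.keys) (fun x => by simp [or_comm]),
        remF0, if_neg hmem]
      simp

theorem zip_replicate_one : ∀ (l : List Int),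
    l.zip (List.replicate l.length (1 : Int)) = l.map (fun v => (v, 1)) := by
  intro l
  induction l with
  | nil => rfl
  | cons v l ih => simp [List.replicate_succ, ih]

-- ---- A-side scans as modifies ----

theorem aScan_eq (arr : List Int) (n : Int) : ∀ (zs l : List Int) (d : PySem.Dict Int Int),
    zs.map (PySem.List.pyGet? arr) = l.map some → d.keys.Nodup → d.contains n = true →
    aScan arr n zs d = d.modify n 0 (· + tw n l) := by
  intro zs
  induction zs with
  | nil =>
    intro l d h hnd hc
    have hl : l = [] := by cases l with | nil => rfl | cons a t => simp at h
    subst hl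
    have : d.modify n 0 (· + tw n []) = d := by
      rw [tw]
      simp only [List.takeWhile_nil, List.length_nil, Nat.cast_zero, add_zero, PySem.Dict.modify]
      exact insert_getD_self d n hnd hc
    rw [this, aScan]
  | cons z zs ih =>
    intro l d h hnd hc
    cases l with
    | nil => simp at h
    | cons x l' =>
      simp only [List.map_cons, List.cons.injEq] at h
      obtain ⟨hz, hrest⟩ := h
      by_cases hnx : n > x
      · have hstep : aScan arr n (z :: zs) d = aScan arr n zs (d.modify n 0 (· + 1)) := by
          rw [aScan, hz]; simp [hnx]
        have hnd' : (d.modify n 0 (· + 1)).keys.Nodup := by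
          simpa [PySem.Dict.modify] using PySem.Dict.nodup_keys_insert d n _ hnd
        have hc' : (d.modify n 0 (· + 1)).contains n = true := by
          simp [PySem.Dict.modify]
        rw [hstep, ih l' _ hrest hnd' hc', modify_modify]
        have htw : tw n (x :: l') = 1 + tw n l' := by
          rw [tw, tw, List.takeWhile_cons_of_pos (by simpa using hnx)]
          simp only [List.length_cons]
          push_cast; ring
        rw [htw]
      · have hstep : aScan arr n (z :: zs) d = d := by
          rw [aScan, hz]; simp [hnx]
        have htw : tw n (x :: l') = 0 := by
          rw [tw, List.takeWhile_cons_of_neg (by simpa using hnx)]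
          simp
        rw [hstep, htw]
        rw [show (fun w => w + (0 : Int)) = fun w => w + (0:Int) from rfl]
        have : d.modify n 0 (· + (0 : Int)) = d := by
          simp only [PySem.Dict.modify, add_zero]
          exact insert_getD_self d n hnd hc
        rw [this]

theorem range_left (arr : List Int) : ∀ (k : Nat), k ≤ arr.length →
    (PySem.List.pyRange ((k : Int) - 1) (-1) (-1)).map (PySem.List.pyGet? arr)
      = ((arr.take k).reverse).map some := by
  intro k
  induction k with
  | zero =>
    intro _
    rw [PySem.List.pyRange_neg_one_eq_nil (by norm_num)]
    simp
  | succ k ih =>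
    intro hk
    have hklt : k < arr.length := by omega
    have hcast : ((k + 1 : Nat) : Int) - 1 = (k : Int) := by push_cast; ring
    rw [hcast, PySem.List.pyRange_neg_one_cons (by omega)]
    rw [List.map_cons, PySem.List.pyGet?_natCast, List.getElem?_eq_getElem hklt]
    rw [List.take_add_one, List.getElem?_eq_getElem hklt]
    simp only [Option.toList_some, List.reverse_append, List.reverse_cons, List.reverse_nil,
      List.nil_append, List.map_cons, List.cons_append]
    rw [show ((k : Int) - 1) = (k : Int) - 1 from rfl, ih (by omega)]

theorem range_right (arr : List Int) : ∀ (l : List Int) (j : Nat), arr.drop j = l →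
    (PySem.List.pyRange (j : Int) (arr.length : Int) 1).map (PySem.List.pyGet? arr) = l.map some := by
  intro l
  induction l with
  | nil =>
    intro j h
    have : arr.length ≤ j := List.drop_eq_nil_iff.mp h
    rw [PySem.List.pyRange_one_eq_nil (by exact_mod_cast this)]
    rfl
  | cons x l' ih =>
    intro j h
    have hj : j < arr.length := by
      have := congrArg List.length h
      simp at this
      omega
    have hget : arr[j]? = some x := by
      have h0 : (arr.drop j)[0]? = some x := by rw [h]; rfl
      rwa [List.getElem?_drop, Nat.add_zero] at h0
    have hdrop : arr.drop (j + 1) = l' := by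
      have : (arr.drop j).drop 1 = arr.drop (j + 1) := by
        rw [List.drop_drop]
      rw [← this, h]
      rfl
    rw [PySem.List.pyRange_one_cons (by exact_mod_cast hj)]
    rw [List.map_cons, PySem.List.pyGet?_natCast, hget, List.map_cons]
    rw [show (j : Int) + 1 = ((j + 1 : Nat) : Int) by push_cast; ring, ih (j + 1) hdrop]

-- A's enumerate fold reduces to a fold of modifies over cnt
theorem A_fold (arr : List Int) : ∀ (suf : List Int) (k : Nat) (d : PySem.Dict Int Int),
    arr.drop k = suf → d.keys.Nodup → (∀ x ∈ arr, d.contains x = true) →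
    (PySem.List.enumerate suf (k : Int)).foldl (aStep arr) d
      = (cnt ((arr.take k).reverse) suf).foldl (fun d p => d.modify p.1 0 (· + p.2)) d := by
  intro suf
  induction suf with
  | nil => intro k d _ _ _; rfl
  | cons v suf' ih =>
    intro k d hdrop hnd hpres
    have hj : k < arr.length := by
      have := congrArg List.length hdrop
      simp at this
      omega
    have hvmem : v ∈ arr := List.drop_subset k arr (by rw [hdrop]; exact List.mem_cons_self ..)
    have hdrop' : arr.drop (k + 1) = suf' := by
      have h1 : (arr.drop k).drop 1 = arr.drop (k + 1) := by rw [List.drop_drop]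
      rw [← h1, hdrop]
      rfl
    have hget : arr[k]? = some v := by
      have h0 : (arr.drop k)[0]? = some v := by rw [hdrop]; rfl
      rwa [List.getElem?_drop, Nat.add_zero] at h0
    have htake : (arr.take (k + 1)).reverse = v :: (arr.take k).reverse := by
      rw [List.take_add_one, hget]
      simp
    rw [PySem.List.enumerate_cons, List.foldl_cons]
    have hL := aScan_eq arr v (PySem.List.pyRange ((k : Int) - 1) (-1) (-1))
      ((arr.take k).reverse) d (range_left arr k (le_of_lt hj)) hnd (hpres v hvmem)
    have hnd1 : (d.modify v 0 (· + tw v ((arr.take k).reverse))).keys.Nodup := by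
      simpa [PySem.Dict.modify] using PySem.Dict.nodup_keys_insert d v _ hnd
    have hpres1 : ∀ x ∈ arr, (d.modify v 0 (· + tw v ((arr.take k).reverse))).contains x = true := by
      intro x hx
      simp [PySem.Dict.modify, PySem.Dict.contains_insert, hpres x hx]
    have hcast : (k : Int) + 1 = ((k + 1 : Nat) : Int) := by push_cast; ring
    have hR := aScan_eq arr v (PySem.List.pyRange ((k : Int) + 1) (arr.length : Int) 1) suf'
      (d.modify v 0 (· + tw v ((arr.take k).reverse)))
      (by rw [hcast]; exact range_right arr suf' (k + 1) hdrop') hnd1 (hpres1 v hvmem)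
    have hstep : aStep arr d ((k : Int), v)
        = d.modify v 0 (· + (tw v ((arr.take k).reverse) + tw v suf')) := by
      rw [aStep]
      simp only []
      rw [hL, hR, modify_modify]
    have hnd2 : (d.modify v 0 (· + (tw v ((arr.take k).reverse) + tw v suf'))).keys.Nodup := by
      simpa [PySem.Dict.modify] using PySem.Dict.nodup_keys_insert d v _ hnd
    have hpres2 : ∀ x ∈ arr,
        (d.modify v 0 (· + (tw v ((arr.take k).reverse) + tw v suf'))).contains x = true := by
      intro x hx
      simp [PySem.Dict.modify, PySem.Dict.contains_insert, hpres x hx]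
    rw [hstep, cnt, List.foldl_cons, hcast, ih (k + 1) _ hdrop' hnd2 hpres2, htake]

-- B's zip fold reduces to a fold of inserts over cnt
theorem B_fold : ∀ (suf pre : List Int) (d : PySem.Dict Int Int),
    (suf.zip ((specSpans pre suf).zip (rsp suf))).foldl
      (fun d vlr => d.insert vlr.1 (d.getD vlr.1 1 + (vlr.2.1 - 1) + (vlr.2.2 - 1))) d
      = (cnt pre suf).foldl (fun d p => d.insert p.1 (d.getD p.1 1 + p.2)) d := by
  intro suf
  induction suf with
  | nil => intro pre d; rfl
  | cons v suf ih =>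
    intro pre d
    rw [specSpans, rsp, cnt, List.zip_cons_cons, List.zip_cons_cons, List.foldl_cons, List.foldl_cons]
    rw [ih]
    congr 2
    ring

theorem cnt_fst : ∀ (pre suf : List Int), (cnt pre suf).map Prod.fst = suf := by
  intro pre suf
  induction suf generalizing pre with
  | nil => rfl
  | cons v suf ih => rw [cnt, List.map_cons, ih]

-- the central dict equality: A's modify-fold from the seeded dict equals
-- B's insert-with-default-1 fold from the empty dict
theorem dict_fold : ∀ (ps : List (Int × Int)) (E : PySem.Dict Int Int), E.keys.Nodup →
    ps.foldl (fun d p => d.modify p.1 0 (· + p.2))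
      (PySem.Dict.mk (E.items ++ (remF0 (ps.map Prod.fst) E.keys).map (fun v => (v, 1))))
      = ps.foldl (fun d p => d.insert p.1 (d.getD p.1 1 + p.2)) E := by
  intro ps
  induction ps with
  | nil =>
    intro E _
    cases E with
    | mk items => simp [remF0]
  | cons p ps ih =>
    intro E hnd
    obtain ⟨v, c⟩ := p
    have hkeq : E.keys = E.items.map Prod.fst := rfl
    rw [List.map_cons, List.foldl_cons, List.foldl_cons]
    by_cases hv : v ∈ E.keys
    · have hc : E.contains v = true := (PySem.Dict.contains_iff_mem_keys E v).mpr hv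
      rw [show remF0 (v :: ps.map Prod.fst) E.keys = remF0 (ps.map Prod.fst) E.keys by
        rw [remF0, if_pos hv]]
      have h₂ : v ∉ ((remF0 (ps.map Prod.fst) E.keys).map (fun v => ((v : Int), (1 : Int)))).map
          Prod.fst := by
        intro hm
        rcases List.mem_map.mp hm with ⟨q, hq, hqv⟩
        rcases List.mem_map.mp hq with ⟨x, hx, rfl⟩
        have hxv : x = v := by simpa using hqv
        exact ((mem_remF0_iff _ _ x).mp hx).2 (by rwa [hxv])
      rw [modify_append_left E.items _ v c (by rw [← hkeq]; exact hv) h₂]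
      have hEE : (PySem.Dict.mk E.items : PySem.Dict Int Int) = E := rfl
      rw [hEE]
      have hmod : E.modify v 0 (· + c) = E.insert v (E.getD v 0 + c) := rfl
      have hkeys' : (E.modify v 0 (· + c)).keys = E.keys := by
        rw [hmod]
        exact PySem.Dict.keys_insert_of_contains E _ hc
      have hnd' : (E.modify v 0 (· + c)).keys.Nodup := by rw [hkeys']; exact hnd
      rw [insert_present E v c hc]
      have := ih (E.modify v 0 (· + c)) hnd'
      rw [hkeys'] at this
      exact this
    · have hc : E.contains v = false := by
        rcases h : E.contains v with _ | _
        · rfl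
        · exact absurd ((PySem.Dict.contains_iff_mem_keys E v).mp h) hv
      rw [show remF0 (v :: ps.map Prod.fst) E.keys = v :: remF0 (ps.map Prod.fst) (v :: E.keys) by
        rw [remF0, if_neg hv]]
      rw [List.map_cons]
      have h₂ : v ∉ ((remF0 (ps.map Prod.fst) (v :: E.keys)).map
          (fun v => ((v : Int), (1 : Int)))).map Prod.fst := by
        intro hm
        rcases List.mem_map.mp hm with ⟨q, hq, hqv⟩
        rcases List.mem_map.mp hq with ⟨x, hx, rfl⟩
        have hxv : x = v := by simpa using hqv
        exact ((mem_remF0_iff _ _ x).mp hx).2 (by simp [hxv])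
      rw [modify_mid E.items _ v c (by rw [← hkeq]; exact hv) h₂]
      rw [insert_absent E v c hc]
      have hkeys' : (PySem.Dict.mk (E.items ++ [(v, 1 + c)]) : PySem.Dict Int Int).keys
          = E.keys ++ [v] := by
        simp [PySem.Dict.keys]
      have hnd' : (PySem.Dict.mk (E.items ++ [(v, 1 + c)]) : PySem.Dict Int Int).keys.Nodup := by
        rw [hkeys']
        exact List.Nodup.append hnd (List.nodup_singleton v)
          (fun a ha hb => hv ((List.mem_singleton.mp hb) ▸ ha))
      have := ih (PySem.Dict.mk (E.items ++ [(v, 1 + c)])) hnd'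
      rw [hkeys',
        remF0_congr (ps.map Prod.fst) (E.keys ++ [v]) (v :: E.keys) (fun x => by simp [or_comm])]
        at this
      rw [← this]
      congr 1
      simp

-- ===== VERDICT (by name: the statement is the Claim_ definition above) =====
theorem map_fst_pair (l : List Int) :
    (l.map (fun v => ((v : Int), (1 : Int)))).map Prod.fst = l := by
  induction l with
  | nil => rfl
  | cons v l ih => simp [ih]

theorem count_subarrays2_spec : Claim_equal_count_subarrays2 := by
  intro arr _
  show count_subarrays2 arr = count_subarrays2_alt arr
  have hnd0 : (PySem.Dict.mk ((remF0 arr []).map (fun v => ((v : Int), (1 : Int))))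
      : PySem.Dict Int Int).keys.Nodup := by
    have : (PySem.Dict.mk ((remF0 arr []).map (fun v => ((v : Int), (1 : Int))))
        : PySem.Dict Int Int).keys = remF0 arr [] := map_fst_pair _
    rw [this]
    exact nodup_remF0 arr []
  have hkeys0 : (PySem.Dict.mk ((remF0 arr []).map (fun v => ((v : Int), (1 : Int))))
      : PySem.Dict Int Int).keys = remF0 arr [] := map_fst_pair _
  have hpres0 : ∀ x ∈ arr, (PySem.Dict.mk ((remF0 arr []).map (fun v => ((v : Int), (1 : Int))))
      : PySem.Dict Int Int).contains x = true := by
    intro x hx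
    rw [PySem.Dict.contains_iff_mem_keys, hkeys0, mem_remF0_iff]
    exact ⟨hx, by simp⟩
  have hseed : PySem.Dict.ofList (arr.zip (PySem.List.pyRepeat [(1 : Int)] (arr.length : Int)))
      = PySem.Dict.mk ((remF0 arr []).map (fun v => (v, 1))) := by
    rw [PySem.List.pyRepeat_singleton, show ((arr.length : Int)).toNat = arr.length from
      Int.toNat_natCast _, zip_replicate_one]
    have h0 := seed_eq arr PySem.Dict.empty (by simp [PySem.Dict.empty]) (by
      simp [PySem.Dict.empty, PySem.Dict.keys])
    simp only [PySem.Dict.empty, PySem.Dict.keys, List.map_nil, List.nil_append] at h0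
    simpa [PySem.Dict.ofList, PySem.Dict.update, PySem.Dict.empty] using h0
  have hA : count_subarrays2 arr
      = ((cnt [] arr).foldl (fun d p => d.modify p.1 0 (· + p.2))
          (PySem.Dict.mk ((remF0 arr []).map (fun v => (v, 1))))).values := by
    simp only [count_subarrays2, hseed]
    congr 1
    have h0 := A_fold arr arr 0 (PySem.Dict.mk ((remF0 arr []).map (fun v => (v, 1))))
      (by simp) hnd0 hpres0
    simpa using h0
  have hB : count_subarrays2_alt arr
      = ((cnt [] arr).foldl (fun d p => d.insert p.1 (d.getD p.1 1 + p.2))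
          PySem.Dict.empty).values := by
    simp only [count_subarrays2_alt, spans]
    rw [spansGo_spec arr [] [] [] StInv.nil, spansGo_spec arr.reverse [] [] [] StInv.nil]
    simp only [List.reverse_nil, List.nil_append]
    rw [rsp_eq arr]
    exact congrArg PySem.Dict.values (B_fold arr [] PySem.Dict.empty)
  have hdict := dict_fold (cnt [] arr) PySem.Dict.empty (by simp [PySem.Dict.empty, PySem.Dict.keys])
  rw [cnt_fst] at hdict
  simp only [PySem.Dict.empty, PySem.Dict.keys, List.map_nil, List.nil_append] at hdict
  rw [hA, hB]
  exact congrArg PySem.Dict.values hdict
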